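-- pv_equiv track=rewrite | github.com/hadijannat/titan-aas | src/titan/api/middleware/cors.py | validate_origin
-- ===== SOURCE A (Python) =====
-- from collections.abc import Sequence
--
-- def validate_origin(origin: str, allowed_origins: Sequence[str]) -> bool:
--     """Validate an origin against the allowed list.
--
--     Args:
--         origin: The origin to validate
--         allowed_origins: List of allowed origins (may include "*")
--
--     Returns:
--         True if origin is allowed
--     """
--     if "*" in allowed_origins:
--         return True
--
--     # Exact match
--     if origin in allowed_origins:
--         return True
--
--     # Check for subdomain wildcards (e.g., "*.example.com")
--     for allowed in allowed_origins:
--         if allowed.startswith("*."):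
--             suffix = allowed[1:]  # ".example.com"
--             if origin.endswith(suffix):
--                 # Ensure there's a proper subdomain
--                 prefix = origin[: -len(suffix)]
--                 if prefix and "://" in prefix:
--                     return True
--
--     return False
-- ===== SOURCE B (Python) =====
-- def validate_origin(origin, allowed_origins):
--     # Derive, from the origin alone, every pattern that admits it:
--     # "*", the origin itself, and "*" + origin[i:] for each dot position i
--     # lying strictly after the "://" separator (so the scheme prefix is
--     # nonempty and contains "://"); then test allowed entries for membership.
--     candidates = {"*", origin}
--     p = origin.find("://")
--     if p != -1:
--         for i in range(p + 3, len(origin)):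
--             if origin[i] == ".":
--                 candidates.add("*" + origin[i:])
--     return any(a in candidates for a in allowed_origins)
-- ===== Notes on version B (the rewrite author's own statement) =====
-- stated objective: alternative
-- what changed: B inverts the matching direction: instead of scanning each allowed pattern and testing it against the origin (A's three scans), B enumerates from the origin alone the finite set of patterns that admit it ('*', the origin, and '*'+origin[i:] for each dot after '://') and then checks allowed entries for set membership.
import Mathlib
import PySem

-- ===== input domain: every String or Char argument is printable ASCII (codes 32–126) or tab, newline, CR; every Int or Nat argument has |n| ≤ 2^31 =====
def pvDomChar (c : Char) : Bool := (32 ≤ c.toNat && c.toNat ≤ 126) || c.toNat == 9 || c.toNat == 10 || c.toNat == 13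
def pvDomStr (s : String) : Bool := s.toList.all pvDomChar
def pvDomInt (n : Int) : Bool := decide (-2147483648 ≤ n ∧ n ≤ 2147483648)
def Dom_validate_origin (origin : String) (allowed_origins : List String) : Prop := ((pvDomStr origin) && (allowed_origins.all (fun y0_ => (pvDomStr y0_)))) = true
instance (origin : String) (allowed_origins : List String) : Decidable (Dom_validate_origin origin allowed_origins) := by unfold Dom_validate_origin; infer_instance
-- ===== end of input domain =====

-- B inverts the matching direction: it derives from the origin the set of patterns that admit it
-- and checks allowed entries for membership in that set; alternative algorithm, same result.

-- ===== PORT A =====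
-- the 'for allowed in allowed_origins' wildcard loop of A, with its early return
def pvWildLoop (origin : String) : List String → Bool
  | [] => false
  | allowed :: rest =>
    if PySem.Str.startswith allowed "*." then
      let suffix := PySem.Str.slice allowed (some 1) none    -- allowed[1:]
      if PySem.Str.endswith origin suffix then
        let prefixS := PySem.Str.slice origin none (some (-(PySem.Str.len suffix : Int)))  -- origin[:-len(suffix)]
        if prefixS ≠ "" ∧ PySem.Str.isIn "://" prefixS then true
        else pvWildLoop origin rest
      else pvWildLoop origin rest
    else pvWildLoop origin rest

def validate_origin (origin : String) (allowed_origins : List String) : Bool :=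
  if allowed_origins.contains "*" then true
  else if allowed_origins.contains origin then true
  else pvWildLoop origin allowed_origins

-- ===== PORT B =====
-- candidates = {"*", origin}; p = origin.find("://"); if p != -1, for each dot position i in
-- range(p+3, len(origin)) add "*" + origin[i:].  (Strings are handled as their code-point lists.)
def pvCandidates (s : List Char) : PySem.Set (List Char) :=
  let base := PySem.Set.add (PySem.Set.add PySem.Set.empty ['*']) s
  let p := PySem.Chars.find s [':', '/', '/']   -- origin.find("://")
  if p = -1 then base
  else (PySem.List.pyRange (p + 3) (s.length : Int)).foldl
    (fun c i =>
      if PySem.List.pyGet? s i = some '.' then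
        PySem.Set.add c ('*' :: PySem.List.slice s (some i) none)
      else c) base

-- any(a in candidates for a in allowed_origins)
def validate_origin_alt (origin : String) (allowed_origins : List String) : Bool :=
  allowed_origins.any (fun a => (pvCandidates origin.toList).contains a.toList)

-- ===== PRECONDITION & SPEC =====
def Spec_validate_origin (origin : String) (allowed_origins : List String) (out : Bool) : Prop := out = validate_origin_alt origin allowed_origins
instance (origin : String) (allowed_origins : List String) (out : Bool) : Decidable (Spec_validate_origin origin allowed_origins out) := by unfold Spec_validate_origin; infer_instance

-- ===== CLAIM (what is proved, stated in full; the proofs are below) =====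
def Claim_equal_validate_origin : Prop := ∀ (origin : String) (allowed_origins : List String), Dom_validate_origin origin allowed_origins → Spec_validate_origin origin allowed_origins (validate_origin origin allowed_origins)

-- ===== LEMMAS AND PROOFS =====

-- the condition under which B's loop adds the candidate x = '*' :: s.drop i
def pvCandCond (s x : List Char) : Prop :=
  0 ≤ PySem.Chars.find s [':', '/', '/'] ∧
    ∃ i : Nat, PySem.Chars.find s [':', '/', '/'] + 3 ≤ (i : Int) ∧ i < s.length ∧
      s[i]? = some '.' ∧ x = '*' :: s.drop i

theorem mem_foldl_add (f : Int → List Char) (l : List Int) (init : PySem.Set (List Char)) (x : List Char) :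
    x ∈ l.foldl (fun c i => PySem.Set.add c (f i)) init ↔ x ∈ init ∨ ∃ i ∈ l, x = f i := by
  induction l generalizing init with
  | nil => simp
  | cons a t ih => simp [ih, PySem.Set.mem_add]; tauto

theorem mem_pvCandidates (s x : List Char) :
    x ∈ pvCandidates s ↔ x = ['*'] ∨ x = s ∨ pvCandCond s x := by
  unfold pvCandidates pvCandCond
  by_cases hp : PySem.Chars.find s [':', '/', '/'] = -1
  · simp [hp, PySem.Set.mem_add, PySem.Set.empty]
  · have hp0 : 0 ≤ PySem.Chars.find s [':', '/', '/'] := by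
      have := PySem.Chars.neg_one_le_find s [':', '/', '/']; omega
    simp only [hp, if_false]
    rw [PySem.List.foldl_ite_eq_foldl_filter (p := fun i => PySem.List.pyGet? s i = some '.')
      (f := fun c i => PySem.Set.add c ('*' :: PySem.List.slice s (some i) none)),
      mem_foldl_add]
    simp only [List.mem_filter, PySem.List.mem_pyRange_one, PySem.Set.mem_add, PySem.Set.empty,
      List.not_mem_nil, false_or, decide_eq_true_eq]
    constructor
    · rintro (⟨h1 | h1⟩ | ⟨i, ⟨⟨hlo, hhi⟩, hdot⟩, hx⟩)
      · tauto
      · tauto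
      · refine Or.inr (Or.inr ⟨hp0, ⟨i.toNat, ?_, ?_, ?_, ?_⟩⟩)
        · omega
        · omega
        · rwa [← PySem.List.pyGet?_natCast, Int.toNat_of_nonneg (by omega)]
        · rw [hx, PySem.List.slice_from s (by omega)]
    · rintro (h | h | ⟨_, i, hlo, hhi, hdot, hx⟩)
      · tauto
      · tauto
      · refine Or.inr ⟨(i : Int), ⟨⟨hlo, by omega⟩, ?_⟩, ?_⟩
        · rwa [PySem.List.pyGet?_natCast]
        · rw [hx, PySem.List.slice_from s (by omega), Int.toNat_natCast]

-- the per-entry wildcard test of A, as a standalone predicate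
def pvWildTest (origin allowed : String) : Bool :=
  PySem.Str.startswith allowed "*." &&
    (PySem.Str.endswith origin (PySem.Str.slice allowed (some 1) none) &&
      (decide ((PySem.Str.slice origin none (some (-(PySem.Str.len (PySem.Str.slice allowed (some 1) none) : Int)))) ≠ "") &&
        PySem.Str.isIn "://" (PySem.Str.slice origin none (some (-(PySem.Str.len (PySem.Str.slice allowed (some 1) none) : Int))))))

theorem pvWildLoop_eq_any (origin : String) (l : List String) :
    pvWildLoop origin l = l.any (pvWildTest origin) := by
  induction l with
  | nil => rfl
  | cons a rest ih =>
    simp only [pvWildLoop, pvWildTest, List.any_cons]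
    split_ifs with h1 h2 h3 <;> simp_all

theorem clamp_neg (n k : Nat) (h0 : 0 < k) (h : k ≤ n) : PySem.List.clampIdx n (-(k:Int)) = n - k := by
  unfold PySem.List.clampIdx; split_ifs <;> omega

theorem slice_neg_end (s : List Char) (k : Nat) (h0 : 0 < k) (h : k ≤ s.length) :
    PySem.List.slice s none (some (-(k:Int))) = s.take (s.length - k) := by
  simp [PySem.List.slice, clamp_neg _ _ h0 h]

-- A's wildcard test holds exactly when B's loop adds the pattern as a candidate
theorem wild_iff (origin a : String) :
    pvWildTest origin a = true ↔ pvCandCond origin.toList a.toList := by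
  unfold pvWildTest pvCandCond
  simp only [Bool.and_eq_true, PySem.Str.startswith_eq, PySem.Str.endswith_eq, PySem.Str.isIn_eq,
    decide_eq_true_eq, PySem.Chars.startswith_iff, PySem.Chars.endswith_iff,
    PySem.Chars.isIn_iff_infix, ne_eq, ← String.toList_inj, PySem.Str.toList_slice,
    PySem.Str.len_eq, PySem.Chars.slice_eq_listSlice,
    PySem.List.slice_from a.toList (show (0:Int) ≤ 1 by norm_num), Int.toNat_one]
  rw [show ("*.".toList : List Char) = ['*', '.'] from rfl,
      show ("".toList : List Char) = [] from rfl,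
      show ("://".toList : List Char) = [':', '/', '/'] from rfl]
  set sL := origin.toList with hsL
  set aL := a.toList with haL
  constructor
  · rintro ⟨h1, h2, h3, h4⟩
    obtain ⟨r, hr⟩ := h1
    have hk1 : 1 ≤ (aL.drop 1).length := by rw [← hr]; simp
    have hkle : (aL.drop 1).length ≤ sL.length := h2.length_le
    rw [slice_neg_end sL _ hk1 hkle] at h3 h4
    have hdrop : aL.drop 1 = sL.drop (sL.length - (aL.drop 1).length) :=
      List.suffix_iff_eq_drop.mp h2
    set k := (aL.drop 1).length with hk
    have hp0 : 0 ≤ PySem.Chars.find sL [':', '/', '/'] :=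
      (PySem.Chars.find_nonneg_iff _ _).mpr (h4.trans (List.take_prefix _ _).isInfix)
    obtain ⟨u, v, huv⟩ := h4
    have hlen : u.length + 3 + v.length = sL.length - k := by
      have := congrArg List.length huv
      simp at this; omega
    have hq : [':', '/', '/'] <+: (sL.take (sL.length - k)).drop u.length := by
      rw [← huv, List.append_assoc, List.drop_left]
      exact ⟨v, rfl⟩
    rw [List.drop_take] at hq
    have ht2 : [':', '/', '/'] <+: sL.drop u.length := (List.prefix_take_iff.mp hq).1
    have hfind := PySem.Chars.find_spec (s := sL) (sub := [':', '/', '/']) hp0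
    have hple : (PySem.Chars.find sL [':', '/', '/']).toNat ≤ u.length :=
      Nat.le_of_not_lt (fun hc => hfind.2 u.length hc ht2)
    refine ⟨hp0, sL.length - k, by omega, by omega, ?_, ?_⟩
    · have h0 : (sL.drop (sL.length - k))[0]? = some '.' := by
        rw [← hdrop, ← hr]; simp
      rw [List.getElem?_drop] at h0
      simpa using h0
    · rw [← hdrop, ← hr]; simp
  · rintro ⟨hp0, i, hpi, hilen, hdot, hx⟩
    have hdropi : sL.drop i = '.' :: sL.drop (i + 1) := by
      rw [List.drop_eq_getElem_cons hilen]
      have : sL[i] = '.' := by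
        have := List.getElem?_eq_getElem hilen
        rw [hdot] at this; exact (Option.some_inj.mp this).symm
      rw [this]
    have hsuf : aL.drop 1 = sL.drop i := by rw [hx]; rfl
    have hk : (aL.drop 1).length = sL.length - i := by rw [hsuf]; simp
    refine ⟨?_, ?_, ?_, ?_⟩
    · rw [hx, hdropi]; exact ⟨sL.drop (i + 1), rfl⟩
    · rw [hsuf]; exact List.drop_suffix i sL
    · rw [hk, slice_neg_end sL _ (by omega) (by omega)]
      intro hnil
      have := congrArg List.length hnil
      simp at this; omega
    · rw [hk, slice_neg_end sL _ (by omega) (by omega),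
        show sL.length - (sL.length - i) = i from by omega]
      have hfind := PySem.Chars.find_spec (s := sL) (sub := [':', '/', '/']) hp0
      have ht : [':', '/', '/'] <+: (sL.drop (PySem.Chars.find sL [':', '/', '/']).toNat).take
          (i - (PySem.Chars.find sL [':', '/', '/']).toNat) :=
        List.prefix_take_iff.mpr ⟨hfind.1, by simp; omega⟩
      rw [← List.drop_take] at ht
      exact ht.isInfix.trans (List.drop_suffix _ _).isInfix

-- per-entry agreement: membership in B's candidate set is A's three-way test
theorem contains_eq (origin a : String) :
    (pvCandidates origin.toList).contains a.toList
      = ((a == "*") || (a == origin) || pvWildTest origin a) := by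
  rw [PySem.Set.contains_eq_decide, Bool.eq_iff_iff]
  simp only [decide_eq_true_eq, Bool.or_eq_true, beq_iff_eq, mem_pvCandidates, wild_iff]
  constructor
  · rintro (h | h | h)
    · exact Or.inl (Or.inl (String.toList_inj.mp h))
    · exact Or.inl (Or.inr (String.toList_inj.mp h))
    · exact Or.inr h
  · rintro ((h | h) | h)
    · exact Or.inl (String.toList_inj.mpr h)
    · exact Or.inr (Or.inl (String.toList_inj.mpr h))
    · exact Or.inr (Or.inr h)

theorem alt_eq_any (origin : String) (l : List String) :
    validate_origin_alt origin l = l.any (fun a => (a == "*") || (a == origin) || pvWildTest origin a) := by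
  unfold validate_origin_alt
  exact PySem.List.any_congr_mem (fun a _ => contains_eq origin a)

-- ===== VERDICT (by name: the statement is the Claim_ definition above) =====
theorem validate_origin_spec : Claim_equal_validate_origin := by
  intro origin l _
  unfold Spec_validate_origin
  rw [validate_origin, alt_eq_any]
  split_ifs with h1 h2
  · simp only [List.contains_eq_any_beq] at h1
    rw [Bool.eq_iff_iff]
    simp only [List.any_eq_true] at h1 ⊢
    obtain ⟨x, hx, he⟩ := h1
    exact ⟨fun _ => ⟨x, hx, by simp_all [BEq.comm]⟩, fun _ => trivial⟩
  · simp only [List.contains_eq_any_beq] at h2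
    rw [Bool.eq_iff_iff]
    simp only [List.any_eq_true] at h2 ⊢
    obtain ⟨x, hx, he⟩ := h2
    exact ⟨fun _ => ⟨x, hx, by simp_all⟩, fun _ => trivial⟩
  · rw [pvWildLoop_eq_any, Bool.eq_iff_iff]
    simp only [List.contains_eq_any_beq, List.any_eq_true, not_exists, not_and] at h1 h2
    simp only [List.any_eq_true]
    constructor
    · rintro ⟨x, hx, hw⟩; exact ⟨x, hx, by simp [hw]⟩
    · rintro ⟨x, hx, hw⟩
      rcases Bool.or_eq_true_iff.mp hw with h | hw'
      · rcases Bool.or_eq_true_iff.mp h with h | h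
        · exact absurd (by simp_all [BEq.comm] : ("*" == x) = true) (h1 x hx)
        · exact absurd (by simp_all [BEq.comm] : (origin == x) = true) (h2 x hx)
      · exact ⟨x, hx, hw'⟩
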